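-- pv_equiv track=rewrite | github.com/TZZheng/AlphaSeeker | src/harness/claims.py | _parse_sections
-- ===== SOURCE A (Python) =====
-- def _parse_sections(draft: str) -> list[tuple[str, str]]:
--     current_section = "Summary"
--     buffer: list[str] = []
--     sections: list[tuple[str, str]] = []
--     for line in draft.splitlines():
--         if line.startswith("## "):
--             if buffer:
--                 sections.append((current_section, "\n".join(buffer).strip()))
--                 buffer = []
--             current_section = line[3:].strip()
--             continue
--         buffer.append(line)
--     if buffer:
--         sections.append((current_section, "\n".join(buffer).strip()))
--     return sections
-- ===== SOURCE B (Python) =====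
-- def _parse_sections(draft: str) -> list[tuple[str, str]]:
--     lines = draft.splitlines()
--     heads = [(i, ln[3:].strip()) for i, ln in enumerate(lines) if ln.startswith("## ")]
--     bounds = [(-1, "Summary")] + heads + [(len(lines), "")]
--     out: list[tuple[str, str]] = []
--     for (i, name), (j, _) in zip(bounds, bounds[1:]):
--         body = lines[i + 1 : j]
--         if body:
--             out.append((name, "\n".join(body).strip()))
--     return out
-- ===== Notes on version B (the rewrite author's own statement) =====
-- stated objective: alternative
-- what changed: Instead of a stateful scan that flushes a mutable buffer at each header, B first indexes all header positions with enumerate, then cuts the line list into slices between consecutive bounds and formats each non-empty segment.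
import Mathlib
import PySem

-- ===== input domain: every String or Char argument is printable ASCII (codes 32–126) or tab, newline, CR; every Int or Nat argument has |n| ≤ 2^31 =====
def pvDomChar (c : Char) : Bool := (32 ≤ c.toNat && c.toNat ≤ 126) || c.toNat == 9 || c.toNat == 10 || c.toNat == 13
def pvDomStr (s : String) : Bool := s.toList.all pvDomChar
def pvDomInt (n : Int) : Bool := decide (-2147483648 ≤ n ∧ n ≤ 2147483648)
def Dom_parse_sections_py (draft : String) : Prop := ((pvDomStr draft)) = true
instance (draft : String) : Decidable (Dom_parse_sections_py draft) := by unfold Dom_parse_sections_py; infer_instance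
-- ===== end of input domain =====

-- B replaces A's single stateful buffer-flushing scan by staged passes: first collect the
-- indexed header positions, then cut the line list into slices between consecutive bounds
-- (objective: alternative, same O(n) cost).

-- shared tiny helpers (used verbatim by both ports)
def pvHeader (l : String) : Bool := PySem.Str.startswith l "## "
def pvName (l : String) : String := PySem.Str.strip (PySem.Str.slice l (some 3) none)
def pvJoinStrip (buf : List String) : String := PySem.Str.strip (PySem.Str.join "\n" buf)

-- ===== PORT A =====
-- one iteration of A's loop over the state (current_section, buffer, sections)
def pvStepA (st : String × List String × List (String × String)) (line : String) :
    String × List String × List (String × String) :=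
  let (cur, buf, secs) := st
  if pvHeader line then
    let secs := if buf ≠ [] then secs ++ [(cur, pvJoinStrip buf)] else secs
    (pvName line, [], secs)
  else
    (cur, buf ++ [line], secs)

def parse_sections_py (draft : String) : List (String × String) :=
  let st := (PySem.Str.splitlines draft).foldl pvStepA ("Summary", [], [])
  if st.2.1 ≠ [] then st.2.2 ++ [(st.1, pvJoinStrip st.2.1)] else st.2.2

-- ===== PORT B =====
-- heads = [(i, ln[3:].strip()) for i, ln in enumerate(lines) if ln.startswith("## ")]
def pvHeads (lines : List String) : List (Int × String) :=
  ((PySem.List.enumerate lines).filter (fun p => pvHeader p.2)).map (fun p => (p.1, pvName p.2))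

-- loop body over one pair of consecutive bounds
def pvStepB (lines : List String) (out : List (String × String))
    (pq : (Int × String) × (Int × String)) : List (String × String) :=
  let body := PySem.List.slice lines (some (pq.1.1 + 1)) (some pq.2.1)
  if body ≠ [] then out ++ [(pq.1.2, pvJoinStrip body)] else out

def parse_sections_py_alt (draft : String) : List (String × String) :=
  let lines := PySem.Str.splitlines draft
  let bounds := ((-1 : Int), "Summary") :: (pvHeads lines ++ [((lines.length : Int), "")])
  (bounds.zip bounds.tail).foldl (pvStepB lines) []

-- ===== PRECONDITION & SPEC =====
def Spec_parse_sections_py (draft : String) (out : List (String × String)) : Prop := out = parse_sections_py_alt draft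
instance (draft : String) (out : List (String × String)) : Decidable (Spec_parse_sections_py draft out) := by unfold Spec_parse_sections_py; infer_instance

-- ===== CLAIM (what is proved, stated in full; the proofs are below) =====
def Claim_equal_parse_sections_py : Prop := ∀ (draft : String), Dom_parse_sections_py draft → Spec_parse_sections_py draft (parse_sections_py draft)

-- ===== LEMMAS AND PROOFS =====

def pvFlush (cur : String) (buf : List String) : List (String × String) :=
  if buf ≠ [] then [(cur, pvJoinStrip buf)] else []

-- common recursive characterisation of the section splitting
def pvSpec : List String → String → List String → List (String × String)
  | [], cur, buf => pvFlush cur buf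
  | l :: ls, cur, buf =>
    if pvHeader l then pvFlush cur buf ++ pvSpec ls (pvName l) []
    else pvSpec ls cur (buf ++ [l])

-- generalised heads with an enumerate start
def pvHeadsFrom (s : Int) (lines : List String) : List (Int × String) :=
  ((PySem.List.enumerate lines s).filter (fun p => pvHeader p.2)).map (fun p => (p.1, pvName p.2))

theorem pvHeads_eq_from (lines : List String) : pvHeads lines = pvHeadsFrom 0 lines := rfl

theorem pv_enum_shift (lines : List String) (s : Int) : ∀ (t : Int),
    PySem.List.enumerate lines (t + s) =
      (PySem.List.enumerate lines t).map (fun p => (p.1 + s, p.2)) := by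
  induction lines with
  | nil => intro t; simp [PySem.List.enumerate_nil]
  | cons l ls ih =>
    intro t
    rw [PySem.List.enumerate_cons, PySem.List.enumerate_cons, List.map_cons]
    congr 1
    have := ih (t + 1)
    rw [show t + 1 + s = t + s + 1 by ring] at this
    exact this

theorem pvHeadsFrom_shift (s : Int) (lines : List String) :
    pvHeadsFrom s lines = (pvHeadsFrom 0 lines).map (fun p => (p.1 + s, p.2)) := by
  unfold pvHeadsFrom
  have e := pv_enum_shift lines s 0
  rw [zero_add] at e
  rw [e, List.filter_map, List.map_map, List.map_map]
  rfl

theorem pvHeadsFrom_fst_nonneg (lines : List String) (p : Int × String)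
    (hp : p ∈ pvHeadsFrom 0 lines) : 0 ≤ p.1 := by
  unfold pvHeadsFrom at hp
  rcases List.mem_map.1 hp with ⟨q, hq, rfl⟩
  have hq' := (List.mem_filter.1 hq).1
  rcases (PySem.List.mem_enumerate_iff _ _ _).1 hq' with ⟨k, hk, rfl⟩
  simp

-- A's fold equals pvSpec
theorem pvA_eq (lines : List String) : ∀ (cur : String) (buf : List String)
    (secs : List (String × String)),
    (fun st : String × List String × List (String × String) =>
      if st.2.1 ≠ [] then st.2.2 ++ [(st.1, pvJoinStrip st.2.1)] else st.2.2)
      (lines.foldl pvStepA (cur, buf, secs)) = secs ++ pvSpec lines cur buf := by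
  induction lines with
  | nil =>
    intro cur buf secs
    by_cases hb : buf = [] <;> simp [pvSpec, pvFlush, hb]
  | cons l ls ih =>
    intro cur buf secs
    rw [List.foldl_cons]
    by_cases h : pvHeader l = true
    · by_cases hb : buf = []
      · have hstep : pvStepA (cur, buf, secs) l = (pvName l, [], secs) := by
          simp [pvStepA, h, hb]
        rw [hstep, ih]
        simp [pvSpec, h, pvFlush, hb]
      · have hstep : pvStepA (cur, buf, secs) l = (pvName l, [], secs ++ [(cur, pvJoinStrip buf)]) := by
          simp [pvStepA, h, hb]
        rw [hstep, ih]
        simp [pvSpec, h, pvFlush, hb]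
    · have hstep : pvStepA (cur, buf, secs) l = (cur, buf ++ [l], secs) := by
        simp [pvStepA, h]
      rw [hstep, ih]
      simp [pvSpec, h]

-- pvSpec on a header-free list
theorem pvSpec_nohdr (lines : List String) : ∀ (cur : String) (buf : List String),
    (∀ l ∈ lines, pvHeader l = false) → pvSpec lines cur buf = pvFlush cur (buf ++ lines) := by
  induction lines with
  | nil => intro cur buf _; simp [pvSpec]
  | cons l ls ih =>
    intro cur buf h
    have hl : pvHeader l = false := h l (by simp)
    simp only [pvSpec, hl, Bool.false_eq_true, if_false]
    rw [ih cur (buf ++ [l]) (fun x hx => h x (by simp [hx]))]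
    simp

-- pvSpec split at the first header
theorem pvSpec_split (pre : List String) (h : String) (t : List String)
    (hpre : ∀ l ∈ pre, pvHeader l = false) (hh : pvHeader h = true) (cur : String) :
    pvSpec (pre ++ h :: t) cur [] = pvFlush cur pre ++ pvSpec t (pvName h) [] := by
  suffices H : ∀ buf, pvSpec (pre ++ h :: t) cur buf = pvFlush cur (buf ++ pre) ++ pvSpec t (pvName h) [] by
    simpa using H []
  induction pre with
  | nil =>
    intro buf
    simp [pvSpec, hh]
  | cons p ps ih =>
    intro buf
    have hp : pvHeader p = false := hpre p (by simp)
    simp only [List.cons_append, pvSpec, hp, Bool.false_eq_true, if_false]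
    rw [ih (fun x hx => hpre x (by simp [hx])) (buf ++ [p])]
    simp

-- slices shift past a dropped prefix
theorem pv_slice_shift (u v : List String) (a b : Int) (ha : 0 ≤ a) (hb : 0 ≤ b) :
    PySem.List.slice (u ++ v) (some (a + u.length)) (some (b + u.length)) =
      PySem.List.slice v (some a) (some b) := by
  rw [PySem.List.slice_toNat _ (by omega : (0:Int) ≤ a + (u.length : Int)) (by omega : (0:Int) ≤ b + (u.length : Int)),
      PySem.List.slice_toNat _ ha hb]
  have h1 : (a + (u.length : Int)).toNat = u.length + a.toNat := by omega
  have h2 : (b + (u.length : Int)).toNat = u.length + b.toNat := by omega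
  rw [h1, h2,
      show u.length + b.toNat - (u.length + a.toNat) = b.toNat - a.toNat by omega,
      List.drop_append, List.drop_eq_nil_of_le (by omega), List.nil_append,
      show u.length + a.toNat - u.length = a.toNat by omega]

-- the B fold pulls (acc) out front
theorem pv_foldB_out (lines : List String) (l : List ((Int × String) × (Int × String))) :
    ∀ out, l.foldl (pvStepB lines) out = out ++ l.foldl (pvStepB lines) [] := by
  induction l with
  | nil => intro out; simp
  | cons pq rest ih =>
    intro out
    rw [List.foldl_cons, List.foldl_cons, ih (pvStepB lines out pq), ih (pvStepB lines [] pq)]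
    unfold pvStepB
    by_cases hbody : PySem.List.slice lines (some (pq.1.1 + 1)) (some pq.2.1) = [] <;>
      simp [hbody]

theorem pv_dropWhile_head (p : String → Bool) : ∀ (l : List String) (h : String) (t : List String),
    l.dropWhile p = h :: t → p h = false := by
  intro l
  induction l with
  | nil => intro h t hyp; simp [List.dropWhile] at hyp
  | cons a as ih =>
    intro h t hyp
    rw [List.dropWhile_cons] at hyp
    by_cases hp : p a = true
    · rw [if_pos hp] at hyp; exact ih _ _ hyp
    · rw [if_neg hp] at hyp
      injection hyp with h1 _
      subst h1
      simpa using hp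

-- B's generalised run
def pvRunB (lines : List String) (cur : String) : List (String × String) :=
  ((((-1 : Int), cur) :: (pvHeadsFrom 0 lines ++ [((lines.length : Int), "")])).zip
    ((((-1 : Int), cur) :: (pvHeadsFrom 0 lines ++ [((lines.length : Int), "")])).tail)).foldl
    (pvStepB lines) []

theorem pvB_eq : ∀ (n : Nat) (lines : List String), lines.length ≤ n →
    ∀ cur, pvRunB lines cur = pvSpec lines cur [] := by
  intro n
  induction n with
  | zero =>
    intro lines hlen cur
    cases lines with
    | cons a as => simp at hlen
    | nil =>
      simp [pvRunB, pvHeadsFrom, PySem.List.enumerate_nil, List.zip, pvStepB, pvSpec, pvFlush,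
        PySem.List.slice]
  | succ n ih =>
    intro lines hlen cur
    rcases hsplit : lines.dropWhile (fun l => !pvHeader l) with _ | ⟨h, t⟩
    · -- no header in lines
      have htw : lines.takeWhile (fun l => !pvHeader l) = lines := by
        conv_rhs => rw [← List.takeWhile_append_dropWhile (p := fun l => !pvHeader l) (l := lines)]
        rw [hsplit, List.append_nil]
      have hall : ∀ l ∈ lines, pvHeader l = false := by
        intro l hl
        have hx : l ∈ lines.takeWhile (fun l => !pvHeader l) := by rw [htw]; exact hl
        simpa using List.mem_takeWhile_imp hx
      have hheads : pvHeadsFrom 0 lines = [] := by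
        unfold pvHeadsFrom
        rw [List.filter_eq_nil_iff.2, List.map_nil]
        intro p hp
        rcases (PySem.List.mem_enumerate_iff _ _ _).1 hp with ⟨k, hk, rfl⟩
        simp [hall _ (List.getElem_mem hk)]
      rw [pvSpec_nohdr lines cur [] hall]
      simp only [pvRunB, hheads, List.nil_append]
      have : PySem.List.slice lines (some ((-1 : Int) + 1)) (some ((lines.length : Int))) = lines := by
        rw [show (-1 : Int) + 1 = ((0 : Nat) : Int) by norm_num]
        rw [show ((lines.length : Int)) = ((lines.length : Nat) : Int) by norm_num]
        rw [PySem.List.slice_natCast]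
        simp
      simp [List.zip, pvStepB, pvFlush]
    · -- lines = pre ++ h :: t with pre header-free, h a header
      set pre := lines.takeWhile (fun l => !pvHeader l) with hpre_def
      have hdecomp : lines = pre ++ h :: t := by
        rw [hpre_def, ← hsplit, List.takeWhile_append_dropWhile]
      have hpre : ∀ l ∈ pre, pvHeader l = false := by
        intro l hl
        have := List.mem_takeWhile_imp hl
        simpa using this
      have hh : pvHeader h = true := by
        simpa using pv_dropWhile_head (fun l => !pvHeader l) lines h t hsplit
      have htlen : t.length ≤ n := by
        have : lines.length = pre.length + 1 + t.length := by rw [hdecomp]; simp; omega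
        omega
      -- heads of lines
      have hheads : pvHeadsFrom 0 lines =
          ((pre.length : Int), pvName h) :: (pvHeadsFrom 0 t).map (fun p => (p.1 + (pre.length + 1 : Int), p.2)) := by
        rw [hdecomp]
        unfold pvHeadsFrom
        rw [PySem.List.enumerate_append, List.filter_append, List.map_append]
        have h1 : ((PySem.List.enumerate pre 0).filter (fun p => pvHeader p.2)) = [] := by
          rw [List.filter_eq_nil_iff.2]
          intro p hp
          rcases (PySem.List.mem_enumerate_iff _ _ _).1 hp with ⟨k, hk, rfl⟩
          simp [hpre _ (List.getElem_mem hk)]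
        rw [h1, List.map_nil, List.nil_append]
        rw [PySem.List.enumerate_cons, List.filter_cons]
        simp only [hh, if_true, List.map_cons, zero_add]
        congr 1
        have := pvHeadsFrom_shift ((pre.length : Int) + 1) t
        unfold pvHeadsFrom at this
        exact this
      -- lines length
      have hlinlen : ((lines.length : Nat) : Int) = (t.length : Int) + ((pre.length : Int) + 1) := by
        rw [hdecomp]; simp; ring
      -- bounds of lines as the shifted bounds of t with first pair peeled
      set k : Int := (pre.length : Int) + 1 with hk_def
      set sh : Int × String → Int × String := fun p => (p.1 + k, p.2) with hsh_def
      have hbounds : pvHeadsFrom 0 lines ++ [((lines.length : Int), "")] =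
          (((-1 : Int), pvName h) :: (pvHeadsFrom 0 t ++ [((t.length : Int), "")])).map sh := by
        rw [hheads]
        simp only [List.map_cons, List.map_append, hsh_def, List.cons_append]
        congr 2
        · omega
        · rw [hlinlen]; simp
      -- now compute B's run
      unfold pvRunB
      rw [hbounds]
      set bt : List (Int × String) := ((-1 : Int), pvName h) :: (pvHeadsFrom 0 t ++ [((t.length : Int), "")]) with hbt_def
      have hzip1 : (((-1 : Int), cur) :: bt.map sh).zip ((((-1 : Int), cur) :: bt.map sh).tail) =
          (((-1 : Int), cur), sh (((-1 : Int)), pvName h)) :: ((bt.map sh).zip (bt.map sh).tail) := by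
        rw [hbt_def]
        simp [List.zip]
      rw [hzip1, List.foldl_cons]
      -- first pair: slice lines[0 : pre.length] = pre
      have hfirst : pvStepB lines [] (((-1 : Int), cur), sh (((-1 : Int)), pvName h)) = pvFlush cur pre := by
        unfold pvStepB pvFlush
        simp only [hsh_def]
        have : PySem.List.slice lines (some ((-1 : Int) + 1)) (some ((-1 : Int) + k)) = pre := by
          rw [show (-1 : Int) + 1 = ((0 : Nat) : Int) by norm_num,
              show (-1 : Int) + k = ((pre.length : Nat) : Int) by rw [hk_def]; ring]
          rw [PySem.List.slice_natCast]
          rw [hdecomp]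
          simp
        rw [this]
        simp
      rw [hfirst, pv_foldB_out]
      -- remaining pairs = t's run shifted
      have hzip2 : (bt.map sh).zip (bt.map sh).tail = (bt.zip bt.tail).map (Prod.map sh sh) := by
        have ht : (bt.map sh).tail = bt.tail.map sh := by rw [hbt_def]; simp
        rw [ht]
        exact List.zip_map
      rw [hzip2, List.foldl_map]
      -- each shifted step equals a step on t
      have hstep : ∀ pq ∈ bt.zip bt.tail, ∀ out,
          pvStepB lines out (Prod.map sh sh pq) = pvStepB t out pq := by
        intro pq hpq out
        obtain ⟨pa, pb⟩ := pq
        obtain ⟨hmem1, hmem2⟩ := List.of_mem_zip hpq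
        have h1 : -1 ≤ pa.1 := by
          rw [hbt_def] at hmem1
          rcases List.mem_cons.1 hmem1 with rfl | hmem1
          · norm_num
          · rcases List.mem_append.1 hmem1 with hm | hm
            · have := pvHeadsFrom_fst_nonneg t _ hm; omega
            · rw [List.mem_singleton] at hm
              subst hm
              show (-1 : Int) ≤ (t.length : Int)
              omega
        have h2 : 0 ≤ pb.1 := by
          rw [hbt_def] at hmem2
          simp only [List.tail_cons] at hmem2
          rcases List.mem_append.1 hmem2 with hm | hm
          · exact pvHeadsFrom_fst_nonneg t _ hm
          · rw [List.mem_singleton] at hm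
            subst hm
            show (0 : Int) ≤ (t.length : Int)
            omega
        unfold pvStepB
        simp only [hsh_def, Prod.map]
        have : PySem.List.slice lines (some (pa.1 + k + 1)) (some (pb.1 + k)) =
            PySem.List.slice t (some (pa.1 + 1)) (some pb.1) := by
          have hdrop : lines = (pre ++ [h]) ++ t := by rw [hdecomp]; simp
          have hlen' : ((pre ++ [h]).length : Int) = k := by simp [hk_def]
          rw [hdrop, show pa.1 + k + 1 = (pa.1 + 1) + ((pre ++ [h]).length : Int) by rw [hlen']; ring,
              show pb.1 + k = pb.1 + ((pre ++ [h]).length : Int) by rw [hlen']]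
          exact pv_slice_shift (pre ++ [h]) t (pa.1 + 1) pb.1 (by omega) h2
        rw [this]
      have hcongr := PySem.List.foldl_congr_mem' (bt.zip bt.tail)
        (fun out pq => pvStepB lines out (Prod.map sh sh pq)) (pvStepB t) [] hstep
      rw [hcongr]
      have := ih t htlen (pvName h)
      unfold pvRunB at this
      rw [this]
      -- assemble with pvSpec_split
      rw [hdecomp, pvSpec_split pre h t hpre hh cur]

-- ===== VERDICT (by name: the statement is the Claim_ definition above) =====
theorem parse_sections_py_spec : Claim_equal_parse_sections_py := by
  intro draft _
  unfold Spec_parse_sections_py parse_sections_py parse_sections_py_alt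
  have hB := pvB_eq (PySem.Str.splitlines draft).length (PySem.Str.splitlines draft) (le_refl _) "Summary"
  unfold pvRunB at hB
  rw [← pvHeads_eq_from] at hB
  simp only []
  rw [hB]
  have hA := pvA_eq (PySem.Str.splitlines draft) "Summary" [] []
  simpa using hA
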